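-- pv_equiv track=rewrite | github.com/NileshBarandwal/mtp2-post-quantum-artemis-zkml | src/kzg_pc_full.py | vanishing_poly
-- ===== SOURCE A (Python) =====
-- def vanishing_poly(roots, mod=None):
--     """
--     Compute vanishing polynomial Z(X) = Π_{r in roots} (X - r).
--     If mod is None, returns exact integer coefficients.
--     If mod is given, reduces coefficients mod mod.
--     """
--     result = [1]
--     for r in roots:
--         # multiply by (X - r) = [-r, 1]
--         new = [0] * (len(result) + 1)
--         for d, c in enumerate(result):
--             new[d] -= c * r
--             new[d + 1] += c
--         result = new
--     if mod is not None:
--         result = [c % mod for c in result]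
--     return result
-- ===== SOURCE B (Python) =====
-- def _add(a, b):
--     # coefficient-wise sum of two polynomials (ascending coefficients)
--     if not a:
--         return b
--     if not b:
--         return a
--     return [a[0] + b[0]] + _add(a[1:], b[1:])
--
--
-- def _mul(a, b):
--     # schoolbook product, recursive on the first factor
--     if not a:
--         return []
--     return _add([a[0] * y for y in b], [0] + _mul(a[1:], b))
--
--
-- def _tree(rs):
--     # subproduct tree: pair the linear factors by divide and conquer
--     if not rs:
--         return [1]
--     if len(rs) == 1:
--         return [-rs[0], 1]
--     m = len(rs) // 2
--     return _mul(_tree(rs[:m]), _tree(rs[m:]))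
--
--
-- def vanishing_poly(roots, mod=None):
--     """
--     Compute vanishing polynomial Z(X) = Π_{r in roots} (X - r).
--     If mod is None, returns exact integer coefficients.
--     If mod is given, reduces coefficients mod mod.
--     """
--     result = _tree(roots)
--     if mod is not None:
--         result = [c % mod for c in result]
--     return result
-- ===== Notes on version B (the rewrite author's own statement) =====
-- stated objective: alternative
-- what changed: Replaces the sequential multiply-by-one-linear-factor loop with a subproduct tree: the linear factors (X - r) are paired by divide and conquer and the two half-products are combined with a general polynomial multiplication.
import Mathlib
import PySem

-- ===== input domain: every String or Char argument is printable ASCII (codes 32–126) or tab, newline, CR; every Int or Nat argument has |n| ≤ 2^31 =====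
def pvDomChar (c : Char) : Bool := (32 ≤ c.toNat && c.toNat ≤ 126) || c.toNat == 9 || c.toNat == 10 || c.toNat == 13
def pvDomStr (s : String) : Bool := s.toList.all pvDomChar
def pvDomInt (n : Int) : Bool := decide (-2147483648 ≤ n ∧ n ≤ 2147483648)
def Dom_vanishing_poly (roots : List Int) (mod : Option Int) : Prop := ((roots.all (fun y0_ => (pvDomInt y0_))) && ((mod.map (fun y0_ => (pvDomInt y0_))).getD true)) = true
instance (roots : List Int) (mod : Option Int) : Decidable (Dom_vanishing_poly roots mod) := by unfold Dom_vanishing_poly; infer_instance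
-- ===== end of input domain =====

-- B replaces A's sequential multiply-by-one-linear-factor loop with a subproduct tree
-- (divide-and-conquer pairing of the linear factors combined by a general polynomial
-- multiplication); objective: alternative algorithm, same exact results.

-- ===== PORT A =====
-- Literal port of A: the inner 'for d, c in enumerate(result)' loop updates the array
-- 'new' in place; 'new[d] -= c*r' / 'new[d+1] += c' are read-then-write at indices that
-- are always in range in Python, so List.getD/List.set is exact here.
def vanishing_poly (roots : List Int) (mod : Option Int) : List Int :=
  let result := roots.foldl (fun result r =>
    (PySem.List.enumerate result 0).foldl (fun new dc =>
      let d := dc.1.toNat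
      let new1 := new.set d (new.getD d 0 - dc.2 * r)
      new1.set (d + 1) (new1.getD (d + 1) 0 + dc.2))
      (List.replicate (result.length + 1) (0 : Int))) [1]
  match mod with
  | some m => result.map (fun c => PySem.Int.mod c m)
  | none => result

-- ===== PORT B =====
-- polyAdd a b = _add(a, b): coefficient-wise sum with implicit zero padding
def polyAdd : List Int → List Int → List Int
  | [], b => b
  | a, [] => a
  | x :: a, y :: b => (x + y) :: polyAdd a b

-- polyMul a b = _mul(a, b): schoolbook product, recursive on the first factor
def polyMul : List Int → List Int → List Int
  | [], _ => []
  | x :: a, b => polyAdd (b.map (fun y => x * y)) (0 :: polyMul a b)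

-- polyTree rs = _tree(rs): subproduct tree over the linear factors (X - r)
def polyTree : List Int → List Int
  | [] => [1]
  | [r] => [-r, 1]
  | a :: b :: t =>
      polyMul (polyTree ((a :: b :: t).take ((a :: b :: t).length / 2)))
              (polyTree ((a :: b :: t).drop ((a :: b :: t).length / 2)))
  termination_by rs => rs.length
  decreasing_by all_goals (simp; omega)

def vanishing_poly_alt (roots : List Int) (mod : Option Int) : List Int :=
  let result := polyTree roots
  match mod with
  | some m => result.map (fun c => PySem.Int.mod c m)
  | none => result

-- ===== PRECONDITION & SPEC =====
-- Pre_ excludes only mod = 0, on which Python's 'c % mod' raises ZeroDivisionError in both A and B.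
def Pre_vanishing_poly (roots : List Int) (mod : Option Int) : Prop := mod ≠ some 0
instance (roots : List Int) (mod : Option Int) : Decidable (Pre_vanishing_poly roots mod) := by
  unfold Pre_vanishing_poly; infer_instance

def pvWitness_vanishing_poly : List Int × Option Int := ([2, -1, 3], some 7)

def Spec_vanishing_poly (roots : List Int) (mod : Option Int) (out : List Int) : Prop := out = vanishing_poly_alt roots mod
instance (roots : List Int) (mod : Option Int) (out : List Int) : Decidable (Spec_vanishing_poly roots mod out) := by unfold Spec_vanishing_poly; infer_instance

-- ===== CLAIM (what is proved, stated in full; the proofs are below) =====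
def Claim_equal_vanishing_poly : Prop := ∀ (roots : List Int) (mod : Option Int), Dom_vanishing_poly roots mod → Pre_vanishing_poly roots mod → Spec_vanishing_poly roots mod (vanishing_poly roots mod)

-- ===== LEMMAS AND PROOFS =====

-- A's one pass over 'result' (multiplication by X - r), written as a clean recursion:
-- tailStep r t p carries the coefficient t that still has to receive the '+= c' part.
def tailStep (r t : Int) : List Int → List Int
  | [] => [t]
  | c :: cs => (t - c * r) :: tailStep r c cs

-- the same step in polyAdd form, convenient for algebra
def stepP (r : Int) (p : List Int) : List Int :=
  polyAdd (p.map (fun c => -(c * r))) (0 :: p)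

def foldlStep (q : List Int) (l : List Int) : List Int :=
  l.foldl (fun acc r => stepP r acc) q

theorem polyAdd_nil_right (a : List Int) : polyAdd a [] = a := by
  cases a <;> rfl

theorem polyAdd_cons (x y : Int) (a b : List Int) :
    polyAdd (x :: a) (y :: b) = (x + y) :: polyAdd a b := rfl

theorem polyAdd_comm (a b : List Int) : polyAdd a b = polyAdd b a := by
  induction a generalizing b with
  | nil => cases b <;> rfl
  | cons x a ih => cases b with
    | nil => rfl
    | cons y b => simp [polyAdd_cons, ih, Int.add_comm]

theorem polyAdd_assoc (a b c : List Int) :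
    polyAdd (polyAdd a b) c = polyAdd a (polyAdd b c) := by
  induction a generalizing b c with
  | nil => rfl
  | cons x a ih =>
    cases b with
    | nil => rfl
    | cons y b =>
      cases c with
      | nil => simp [polyAdd_nil_right, polyAdd_cons]
      | cons z c => simp [polyAdd_cons, ih, Int.add_assoc]

theorem polyAdd_left_comm (a b c : List Int) :
    polyAdd a (polyAdd b c) = polyAdd b (polyAdd a c) := by
  rw [← polyAdd_assoc, polyAdd_comm a b, polyAdd_assoc]

theorem polyAdd_add_add_comm (a b c d : List Int) :
    polyAdd (polyAdd a b) (polyAdd c d) = polyAdd (polyAdd a c) (polyAdd b d) := by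
  rw [polyAdd_assoc, polyAdd_left_comm b c d, ← polyAdd_assoc]

theorem polyAdd_singleton_zero (a : List Int) (h : a ≠ []) : polyAdd a [0] = a := by
  cases a with
  | nil => exact absurd rfl h
  | cons x a => simp [polyAdd, polyAdd_nil_right]

theorem map_hom_polyAdd (f : Int → Int) (hf : ∀ a b, f (a + b) = f a + f b) (u v : List Int) :
    (polyAdd u v).map f = polyAdd (u.map f) (v.map f) := by
  induction u generalizing v with
  | nil => rfl
  | cons c u ih =>
    cases v with
    | nil => simp [polyAdd_nil_right]
    | cons d v => simp [polyAdd_cons, ih, hf]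

theorem map_mul_polyAdd (x : Int) (u v : List Int) :
    (polyAdd u v).map (fun y => x * y) = polyAdd (u.map (fun y => x * y)) (v.map (fun y => x * y)) :=
  map_hom_polyAdd _ (fun a b => by ring) u v

theorem tailStep_eq (r : Int) (p : List Int) (t : Int) :
    tailStep r t p = polyAdd (p.map (fun c => -(c * r))) (t :: p) := by
  induction p generalizing t with
  | nil => rfl
  | cons c cs ih => simp [tailStep, polyAdd_cons, ih c]; ring

-- helpers for the in-place array updates of A's inner loop
theorem getD_append_len (pre : List Int) (t : Int) (z : List Int) :
    (pre ++ t :: z).getD pre.length 0 = t := by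
  induction pre with
  | nil => rfl
  | cons x pre ih => simp [ih]

theorem set_append_len (pre : List Int) (t u : Int) (z : List Int) :
    (pre ++ t :: z).set pre.length u = pre ++ u :: z := by
  induction pre with
  | nil => rfl
  | cons x pre ih => simp [ih]

-- characterisation of A's inner foldl over 'enumerate result'
theorem aInner (r : Int) (p : List Int) :
    ∀ (k : Nat) (pre : List Int) (t : Int), pre.length = k →
    (PySem.List.enumerate p (k : Int)).foldl (fun new dc =>
      let d := dc.1.toNat
      let new1 := new.set d (new.getD d 0 - dc.2 * r)
      new1.set (d + 1) (new1.getD (d + 1) 0 + dc.2))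
      (pre ++ t :: List.replicate p.length (0 : Int))
    = pre ++ tailStep r t p := by
  induction p with
  | nil => intro k pre t hk; simp [PySem.List.enumerate_nil, tailStep]
  | cons c cs ih =>
    intro k pre t hk
    rw [PySem.List.enumerate_cons, List.foldl_cons]
    have h1 : ((k : Int)).toNat = k := Int.toNat_natCast k
    have hrep : List.replicate (c :: cs).length (0 : Int) = 0 :: List.replicate cs.length 0 := by
      simp [List.replicate]
    -- first update: new[k] = t - c * r
    have e1 : (pre ++ t :: List.replicate (c :: cs).length (0 : Int)).getD ((k : Int)).toNat 0 = t := by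
      rw [h1, ← hk, getD_append_len]
    have e2 : (pre ++ t :: List.replicate (c :: cs).length (0 : Int)).set ((k : Int)).toNat (t - c * r)
        = pre ++ (t - c * r) :: 0 :: List.replicate cs.length 0 := by
      rw [h1, ← hk, hrep, set_append_len]
    -- second update: new[k+1] = 0 + c
    have hlen : (pre ++ [t - c * r]).length = k + 1 := by simp [hk]
    have hsplit : pre ++ (t - c * r) :: 0 :: List.replicate cs.length (0 : Int)
        = (pre ++ [t - c * r]) ++ 0 :: List.replicate cs.length 0 := by simp
    have e3 : (pre ++ (t - c * r) :: 0 :: List.replicate cs.length (0 : Int)).getD (((k : Int)).toNat + 1) 0 = 0 := by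
      rw [h1, hsplit, ← hlen, getD_append_len]
    have e4 : (pre ++ (t - c * r) :: 0 :: List.replicate cs.length (0 : Int)).set (((k : Int)).toNat + 1) c
        = (pre ++ [t - c * r]) ++ c :: List.replicate cs.length 0 := by
      rw [h1, hsplit, ← hlen, set_append_len]
    simp only [e1, e2, e3, e4, Int.zero_add]
    have : ((k : Int) + 1) = ((k + 1 : Nat) : Int) := by push_cast; ring
    rw [this, ih (k + 1) (pre ++ [t - c * r]) c hlen]
    simp [tailStep]

theorem aStep_eq_stepP (r : Int) (p : List Int) :
    (PySem.List.enumerate p 0).foldl (fun new dc =>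
      let d := dc.1.toNat
      let new1 := new.set d (new.getD d 0 - dc.2 * r)
      new1.set (d + 1) (new1.getD (d + 1) 0 + dc.2))
      (List.replicate (p.length + 1) (0 : Int))
    = stepP r p := by
  have h0 : List.replicate (p.length + 1) (0 : Int) = ([] : List Int) ++ 0 :: List.replicate p.length 0 := by
    simp [List.replicate]
  have := aInner r p 0 [] 0 rfl
  rw [h0]
  simpa [tailStep_eq, stepP] using this

theorem stepP_ne_nil (r : Int) (p : List Int) : stepP r p ≠ [] := by
  unfold stepP
  cases p <;> simp [polyAdd]

theorem map_ne_nil (f : Int → Int) (u : List Int) (h : u ≠ []) : u.map f ≠ [] := by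
  cases u with
  | nil => exact absurd rfl h
  | cons x u => simp

theorem map_stepP (x r : Int) (u : List Int) :
    (stepP r u).map (fun y => x * y) = stepP r (u.map (fun y => x * y)) := by
  unfold stepP
  rw [map_mul_polyAdd]
  simp only [List.map_cons, List.map_map]
  congr 2
  · funext c; simp [Function.comp]; ring
  · simp

theorem stepP_polyAdd (r : Int) (u v : List Int) :
    stepP r (polyAdd u (0 :: v)) = polyAdd (stepP r u) (0 :: stepP r v) := by
  unfold stepP
  rw [map_hom_polyAdd (fun c => -(c * r)) (fun a b => by ring)]
  simp only [List.map_cons]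
  have hf0 : -((0 : Int) * r) = 0 := by ring
  rw [hf0]
  have h2 : (0 : Int) :: polyAdd u (0 :: v) = polyAdd (0 :: u) (0 :: 0 :: v) := by
    simp [polyAdd_cons]
  have h3 : (0 : Int) :: polyAdd (v.map (fun c => -(c * r))) (0 :: v)
      = polyAdd (0 :: v.map (fun c => -(c * r))) (0 :: 0 :: v) := by
    simp [polyAdd_cons]
  rw [h2, h3]
  exact polyAdd_add_add_comm _ _ _ _

theorem polyMul_stepP (r : Int) (p q : List Int) (hp : p ≠ []) (hq : q ≠ []) :
    polyMul p (stepP r q) = stepP r (polyMul p q) := by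
  induction p with
  | nil => exact absurd rfl hp
  | cons x p' ih =>
    cases p' with
    | nil =>
      show polyAdd ((stepP r q).map (fun y => x * y)) (0 :: polyMul [] (stepP r q))
          = stepP r (polyAdd (q.map (fun y => x * y)) (0 :: polyMul [] q))
      rw [show polyMul ([] : List Int) (stepP r q) = [] from rfl,
          show polyMul ([] : List Int) q = [] from rfl,
          polyAdd_singleton_zero _ (map_ne_nil _ _ (stepP_ne_nil r q)),
          polyAdd_singleton_zero _ (map_ne_nil _ _ hq), map_stepP]
    | cons y p'' =>
      show polyAdd ((stepP r q).map (fun y => x * y)) (0 :: polyMul (y :: p'') (stepP r q))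
          = stepP r (polyAdd (q.map (fun y => x * y)) (0 :: polyMul (y :: p'') q))
      rw [map_stepP, ih (by simp), stepP_polyAdd]

theorem polyMul_one_right (p : List Int) (hp : p ≠ []) : polyMul p [1] = p := by
  induction p with
  | nil => exact absurd rfl hp
  | cons x a ih =>
    cases a with
    | nil => simp [polyMul, polyAdd]
    | cons y b =>
      rw [polyMul, ih (by simp)]
      simp [polyAdd_cons, polyAdd]

theorem foldlStep_ne_nil (l : List Int) : ∀ q : List Int, q ≠ [] → foldlStep q l ≠ [] := by
  induction l with
  | nil => intro q hq; exact hq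
  | cons r l ih => intro q hq; exact ih _ (stepP_ne_nil r q)

theorem polyMul_foldlStep (l : List Int) :
    ∀ p q : List Int, p ≠ [] → q ≠ [] → polyMul p (foldlStep q l) = foldlStep (polyMul p q) l := by
  induction l with
  | nil => intro p q _ _; rfl
  | cons r l ih =>
    intro p q hp hq
    show polyMul p (foldlStep (stepP r q) l) = foldlStep (stepP r (polyMul p q)) l
    rw [ih p _ hp (stepP_ne_nil r q), polyMul_stepP r p q hp hq]

theorem foldl_ext_int (f g : List Int → Int → List Int) (h : ∀ a b, f a b = g a b) :
    ∀ (l : List Int) (i : List Int), l.foldl f i = l.foldl g i := by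
  intro l
  induction l with
  | nil => intro i; rfl
  | cons x l ih => intro i; rw [List.foldl_cons, List.foldl_cons, h, ih]

theorem polyTree_eq (l : List Int) : polyTree l = foldlStep [1] l := by
  induction l using polyTree.induct with
  | case1 => rw [polyTree]; rfl
  | case2 r =>
    rw [polyTree]
    show [-r, 1] = stepP r [1]
    unfold stepP
    simp [polyAdd]
  | case3 a b t ih1 ih2 =>
    rw [polyTree, ih1, ih2]
    have h1 : foldlStep [1] ((a :: b :: t).take ((a :: b :: t).length / 2)) ≠ [] :=
      foldlStep_ne_nil _ [1] (by simp)
    rw [polyMul_foldlStep _ _ [1] h1 (by simp), polyMul_one_right _ h1]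
    show foldlStep (foldlStep [1] _) _ = _
    unfold foldlStep
    rw [← List.foldl_append, List.take_append_drop]

-- ===== VERDICT (by name: the statement is the Claim_ definition above) =====
theorem vanishing_poly_spec : Claim_equal_vanishing_poly := by
  intro roots mod _ _
  unfold Spec_vanishing_poly vanishing_poly vanishing_poly_alt
  have hfold : roots.foldl (fun result r =>
      (PySem.List.enumerate result 0).foldl (fun new dc =>
        let d := dc.1.toNat
        let new1 := new.set d (new.getD d 0 - dc.2 * r)
        new1.set (d + 1) (new1.getD (d + 1) 0 + dc.2))
        (List.replicate (result.length + 1) (0 : Int))) [1] = polyTree roots := by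
    rw [polyTree_eq]
    exact foldl_ext_int _ _ (fun p r => aStep_eq_stepP r p) roots [1]
  cases mod with
  | none => simpa using hfold
  | some m => simp only [hfold]
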